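-- pv_equiv track=rewrite | github.com/Giansn/sygnif-swarm | BTC_Prediction/scripts/predict_protocol_offline_swarm_backtest.py | walk_forward_bar_slices
-- ===== SOURCE A (Python) =====
-- def walk_forward_bar_slices(eval_bar_start: int, eval_bar_end: int, folds: int) -> list[tuple[int, int]]:
--     """Split ``[eval_bar_start, eval_bar_end)`` into ``folds`` contiguous half-open slices (equal width, remainder in last)."""
--     folds = max(2, int(folds))
--     es, ee = int(eval_bar_start), int(eval_bar_end)
--     span = ee - es
--     if span < folds:
--         raise ValueError(f"walk_forward_bar_slices: span={span} < folds={folds}")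
--     out: list[tuple[int, int]] = []
--     cur = es
--     for f in range(folds):
--         nxt = es + (span * (f + 1)) // folds
--         if f == folds - 1:
--             nxt = ee
--         out.append((cur, nxt))
--         cur = nxt
--     return out
-- ===== SOURCE B (Python) =====
-- def walk_forward_bar_slices(eval_bar_start: int, eval_bar_end: int, folds: int) -> list[tuple[int, int]]:
--     """Split ``[eval_bar_start, eval_bar_end)`` into ``folds`` contiguous half-open slices (equal width, remainder in last)."""
--     folds = max(2, int(folds))
--     es, ee = int(eval_bar_start), int(eval_bar_end)
--     span = ee - es
--     if span < folds:
--         raise ValueError(f"walk_forward_bar_slices: span={span} < folds={folds}")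
--     q, r = divmod(span, folds)
--     out: list[tuple[int, int]] = []
--     cur = es
--     acc = 0
--     for _ in range(folds):
--         acc += r
--         w = q
--         if acc >= folds:
--             w += 1
--             acc -= folds
--         out.append((cur, cur + w))
--         cur += w
--     return out
-- ===== Notes on version B (the rewrite author's own statement) =====
-- stated objective: alternative
-- what changed: Replaces A's per-fold floor-division boundary formula (with accumulator threading and a last-fold fix-up) by one divmod and a Bresenham-style remainder accumulator that decides each slice's width without any division inside the loop, ending exactly at eval_bar_end with no special case.
import Mathlib
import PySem

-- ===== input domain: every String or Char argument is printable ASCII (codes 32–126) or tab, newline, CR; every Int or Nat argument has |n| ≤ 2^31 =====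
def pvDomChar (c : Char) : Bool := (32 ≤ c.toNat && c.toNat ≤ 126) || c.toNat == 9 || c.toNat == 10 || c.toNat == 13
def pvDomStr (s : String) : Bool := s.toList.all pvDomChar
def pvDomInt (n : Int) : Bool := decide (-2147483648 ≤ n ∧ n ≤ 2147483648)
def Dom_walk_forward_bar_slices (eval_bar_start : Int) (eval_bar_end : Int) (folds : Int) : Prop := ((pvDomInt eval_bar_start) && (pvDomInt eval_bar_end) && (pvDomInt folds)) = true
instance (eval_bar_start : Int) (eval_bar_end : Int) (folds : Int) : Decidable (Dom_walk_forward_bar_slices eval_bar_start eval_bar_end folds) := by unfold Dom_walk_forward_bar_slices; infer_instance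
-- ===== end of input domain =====

-- B replaces A's per-fold floor-division boundary formula (plus last-fold fix-up) by one
-- divmod and a Bresenham-style remainder accumulator deciding each slice's width; objective: alternative.

-- ===== PORT A =====
def walk_forward_bar_slices (eval_bar_start : Int) (eval_bar_end : Int) (folds : Int) : List (Int × Int) :=
  let F := max 2 folds
  let es := eval_bar_start
  let ee := eval_bar_end
  let span := ee - es
  if span < F then []   -- Python raises ValueError here; excluded by Pre_
  else
    ((List.range F.toNat).foldl (fun (st : Int × List (Int × Int)) (f : Nat) =>
      let nxt := es + PySem.Int.floordiv (span * ((f : Int) + 1)) F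
      let nxt := if (f : Int) = F - 1 then ee else nxt
      (nxt, st.2 ++ [(st.1, nxt)])) (es, [])).2

-- ===== PORT B =====
def walk_forward_bar_slices_alt (eval_bar_start : Int) (eval_bar_end : Int) (folds : Int) : List (Int × Int) :=
  let F := max 2 folds
  let es := eval_bar_start
  let ee := eval_bar_end
  let span := ee - es
  if span < F then []   -- Python raises ValueError here; excluded by Pre_
  else
    let q := PySem.Int.floordiv span F
    let r := PySem.Int.mod span F
    ((List.range F.toNat).foldl (fun (st : Int × Int × List (Int × Int)) (_ : Nat) =>
      let cur := st.1
      let acc := st.2.1 + r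
      let w := if F ≤ acc then q + 1 else q
      let acc' := if F ≤ acc then acc - F else acc
      (cur + w, acc', st.2.2 ++ [(cur, cur + w)])) (es, 0, [])).2.2

-- ===== PRECONDITION & SPEC =====
-- Pre_ excludes exactly the inputs where A raises ValueError (span < max(2, folds)).
def Pre_walk_forward_bar_slices (eval_bar_start : Int) (eval_bar_end : Int) (folds : Int) : Prop :=
  ¬ (eval_bar_end - eval_bar_start < max 2 folds)
instance (eval_bar_start : Int) (eval_bar_end : Int) (folds : Int) : Decidable (Pre_walk_forward_bar_slices eval_bar_start eval_bar_end folds) := by unfold Pre_walk_forward_bar_slices; infer_instance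

def pvWitness_walk_forward_bar_slices : Int × Int × Int := (0, 10, 3)

def Spec_walk_forward_bar_slices (eval_bar_start : Int) (eval_bar_end : Int) (folds : Int) (out : List (Int × Int)) : Prop := out = walk_forward_bar_slices_alt eval_bar_start eval_bar_end folds
instance (eval_bar_start : Int) (eval_bar_end : Int) (folds : Int) (out : List (Int × Int)) : Decidable (Spec_walk_forward_bar_slices eval_bar_start eval_bar_end folds out) := by unfold Spec_walk_forward_bar_slices; infer_instance

-- ===== CLAIM (what is proved, stated in full; the proofs are below) =====
def Claim_equal_walk_forward_bar_slices : Prop := ∀ (eval_bar_start : Int) (eval_bar_end : Int) (folds : Int), Dom_walk_forward_bar_slices eval_bar_start eval_bar_end folds → Pre_walk_forward_bar_slices eval_bar_start eval_bar_end folds → Spec_walk_forward_bar_slices eval_bar_start eval_bar_end folds (walk_forward_bar_slices eval_bar_start eval_bar_end folds)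

-- ===== LEMMAS AND PROOFS =====

-- invariant of A's loop: after k steps the state is (boundary k, adjacent boundary pairs over range k)
theorem loopA_invariant (es ee F : Int) (hF : 0 < F) (k : Nat) :
    (List.range k).foldl (fun (st : Int × List (Int × Int)) (f : Nat) =>
      let nxt := es + PySem.Int.floordiv ((ee - es) * ((f : Int) + 1)) F
      let nxt := if (f : Int) = F - 1 then ee else nxt
      (nxt, st.2 ++ [(st.1, nxt)])) (es, [])
    = (es + PySem.Int.floordiv ((ee - es) * (k : Int)) F,
       (List.range k).map (fun (i : Nat) =>
         (es + PySem.Int.floordiv ((ee - es) * (i : Int)) F,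
          es + PySem.Int.floordiv ((ee - es) * ((i : Int) + 1)) F))) := by
  induction k with
  | zero =>
      simp [PySem.Int.floordiv_eq_ediv_of_pos hF]
  | succ k ih =>
      rw [List.range_succ, List.foldl_append, ih]
      simp only [List.foldl_cons, List.foldl_nil, List.map_append, List.map_cons,
        List.map_nil]
      by_cases hlast : (k : Int) = F - 1
      · have hee : es + PySem.Int.floordiv ((ee - es) * ((k : Int) + 1)) F = ee := by
          have hkF : ((k : Int) + 1) = F := by omega
          rw [hkF, PySem.Int.floordiv_eq_ediv_of_pos hF,
            Int.mul_ediv_cancel _ (ne_of_gt hF)]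
          omega
        simp only [if_pos hlast]
        push_cast
        rw [hee]
      · simp only [if_neg hlast]
        push_cast
        rfl

-- one Bresenham step: adding r to the accumulator advances the floor-division boundary by q (+1 on carry)
theorem bres_step (F r a : Int) (hF : 0 < F) (hr0 : 0 ≤ r) (hrF : r < F) :
    ((a + r) / F = a / F + (if F ≤ a % F + r then 1 else 0)) ∧
    ((a + r) % F = a % F + r - (if F ≤ a % F + r then F else 0)) := by
  have h1 : F * (a / F) + a % F = a := Int.ediv_add_emod a F
  have h2 : 0 ≤ a % F := Int.emod_nonneg a (by omega)
  have h3 : a % F < F := Int.emod_lt_of_pos a hF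
  have habs : |F| = F := abs_of_pos hF
  by_cases hc : F ≤ a % F + r
  · have hx : F * (a / F + 1) = F * (a / F) + F := by ring
    have := (Int.ediv_emod_unique'' (a := a + r) (b := F)
      (r := a % F + r - F) (q := a / F + 1) (by omega)).2 ⟨by omega, by omega, by omega⟩
    simp only [if_pos hc]
    omega
  · have := (Int.ediv_emod_unique'' (a := a + r) (b := F)
      (r := a % F + r) (q := a / F) (by omega)).2 ⟨by omega, by omega, by omega⟩
    simp only [if_neg hc]
    omega

-- invariant of B's loop: after k steps cur = es + q·k + ⌊r·k/F⌋, acc = r·k mod F,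
-- and the output lists the adjacent pairs of that boundary function
theorem loopB_invariant (es F q r : Int) (hF : 0 < F) (hr0 : 0 ≤ r) (hrF : r < F) (k : Nat) :
    (List.range k).foldl (fun (st : Int × Int × List (Int × Int)) (_ : Nat) =>
      let cur := st.1
      let acc := st.2.1 + r
      let w := if F ≤ acc then q + 1 else q
      let acc' := if F ≤ acc then acc - F else acc
      (cur + w, acc', st.2.2 ++ [(cur, cur + w)])) (es, 0, [])
    = (es + q * (k : Int) + (r * (k : Int)) / F, (r * (k : Int)) % F,
       (List.range k).map (fun (i : Nat) =>
         (es + q * (i : Int) + (r * (i : Int)) / F,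
          es + q * ((i : Int) + 1) + (r * ((i : Int) + 1)) / F))) := by
  induction k with
  | zero => simp
  | succ k ih =>
      rw [List.range_succ, List.foldl_append, ih]
      simp only [List.foldl_cons, List.foldl_nil, List.map_append, List.map_cons,
        List.map_nil]
      obtain ⟨hd, hm⟩ := bres_step F r (r * (k : Int)) hF hr0 hrF
      have hr1 : r * ((k : Int) + 1) = r * (k : Int) + r := by ring
      have hq1 : q * ((k : Int) + 1) = q * (k : Int) + q := by ring
      push_cast
      rw [hr1, hd, hm]
      by_cases hc : F ≤ r * (k : Int) % F + r
      · simp only [if_pos hc] at hd hm ⊢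
        simp only [Prod.mk.injEq, List.append_cancel_left_eq, List.cons.injEq, and_true]
        exact ⟨by omega, trivial, trivial, by omega⟩
      · simp only [if_neg hc] at hd hm ⊢
        simp only [Prod.mk.injEq, List.append_cancel_left_eq, List.cons.injEq, and_true]
        exact ⟨by omega, by omega, trivial, by omega⟩

-- the two boundary functions agree: es + q·f + ⌊r·f/F⌋ = es + ⌊span·f/F⌋ for span = F·q + r
theorem bound_eq (F q r f : Int) (hF : 0 < F) :
    q * f + (r * f) / F = ((F * q + r) * f) / F := by
  have : (F * q + r) * f = r * f + (q * f) * F := by ring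
  rw [this, Int.add_mul_ediv_right _ _ (ne_of_gt hF)]
  omega

theorem walk_forward_bar_slices_eq (es ee folds : Int)
    (hpre : ¬ (ee - es < max 2 folds)) :
    walk_forward_bar_slices es ee folds = walk_forward_bar_slices_alt es ee folds := by
  unfold walk_forward_bar_slices walk_forward_bar_slices_alt
  simp only [if_neg hpre]
  have hF : (0 : Int) < max 2 folds := by omega
  set F := max 2 folds with hFdef
  set span := ee - es with hspan
  have hq : PySem.Int.floordiv span F = span / F :=
    PySem.Int.floordiv_eq_ediv_of_pos hF
  have hr : PySem.Int.mod span F = span % F :=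
    PySem.Int.mod_eq_emod_of_pos hF
  have hr0 : 0 ≤ span % F := Int.emod_nonneg span (by omega)
  have hrF : span % F < F := Int.emod_lt_of_pos span hF
  rw [loopA_invariant es ee F hF F.toNat, hq, hr,
    loopB_invariant es F (span / F) (span % F) hF hr0 hrF F.toNat]
  apply List.map_congr_left
  intro i _
  have hspan' : F * (span / F) + span % F = span := Int.ediv_add_emod span F
  have e1 := bound_eq F (span / F) (span % F) (i : Int) hF
  have e2 := bound_eq F (span / F) (span % F) ((i : Int) + 1) hF
  rw [hspan'] at e1 e2
  rw [PySem.Int.floordiv_eq_ediv_of_pos hF, PySem.Int.floordiv_eq_ediv_of_pos hF]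
  rw [← hspan]
  simp only [Prod.mk.injEq]
  constructor
  · omega
  · omega

-- ===== VERDICT (by name: the statement is the Claim_ definition above) =====
theorem walk_forward_bar_slices_spec : Claim_equal_walk_forward_bar_slices := by
  intro es ee folds _ hpre
  exact walk_forward_bar_slices_eq es ee folds hpre
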